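-- pv_equiv track=rewrite | github.com/matbanik/zorivest | packages/infrastructure/src/zorivest_infra/broker_adapters/tos_csv.py | _extract_data_lines
-- ===== SOURCE A (Python) =====
-- def _extract_data_lines(content: str) -> list[str]:
--     """Extract Trade History section from multi-section TOS CSV."""
--     lines = content.splitlines()
--
--     # Find "Trade History" section
--     trade_section_start = None
--     for i, line in enumerate(lines):
--         if "Trade History" in line:
--             trade_section_start = i + 1  # Header row is next
--             break
--
--     if trade_section_start is None:
--         # No multi-section format — try treating entire file as trades
--         return [line for line in lines if line.strip()]
--
--     # Collect lines until next section or end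
--     data_lines: list[str] = []
--     for i in range(trade_section_start, len(lines)):
--         line = lines[i].strip()
--         if not line:
--             continue
--         # Stop at next section (non-CSV line without commas,
--         # or a section header like "Cash Balance")
--         if i > trade_section_start and "," not in line:
--             break
--         data_lines.append(lines[i])
--
--     return data_lines
-- ===== SOURCE B (Python) =====
-- def _extract_data_lines(content: str) -> list[str]:
--     """Single-pass finite-state machine over the lines: SEARCH -> FIRST -> COLLECT -> DONE,
--     accumulating the no-marker fallback and the section lines simultaneously."""
--     SEARCH, FIRST, COLLECT, DONE = 0, 1, 2, 3
--     state = SEARCH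
--     fallback: list[str] = []
--     section: list[str] = []
--     for line in content.splitlines():
--         if line.strip():
--             fallback.append(line)
--         if state == SEARCH:
--             if "Trade History" in line:
--                 state = FIRST
--         elif state == FIRST:
--             if line.strip():
--                 section.append(line)
--             state = COLLECT
--         elif state == COLLECT:
--             s = line.strip()
--             if s:
--                 if "," in s:
--                     section.append(line)
--                 else:
--                     state = DONE
--     return section if state != SEARCH else fallback
-- ===== Notes on version B (the rewrite author's own statement) =====
-- stated objective: alternative
-- what changed: A's two index loops (find the marker index, then collect from start with an interleaved break) are replaced by a single pass: a finite-state-machine fold (SEARCH/FIRST/COLLECT/DONE) over the lines that accumulates the no-marker fallback and the section lines simultaneously, with no indices and no break.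
import Mathlib
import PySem

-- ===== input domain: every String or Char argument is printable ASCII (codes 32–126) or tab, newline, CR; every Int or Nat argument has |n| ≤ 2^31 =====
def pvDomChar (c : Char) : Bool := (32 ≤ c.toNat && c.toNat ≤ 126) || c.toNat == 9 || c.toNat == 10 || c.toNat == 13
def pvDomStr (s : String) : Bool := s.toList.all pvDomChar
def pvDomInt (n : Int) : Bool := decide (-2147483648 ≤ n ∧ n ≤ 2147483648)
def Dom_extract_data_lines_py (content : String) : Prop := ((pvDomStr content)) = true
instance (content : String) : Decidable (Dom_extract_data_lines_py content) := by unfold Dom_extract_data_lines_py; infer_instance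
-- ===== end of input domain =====

-- B replaces A's two index loops (marker search, then collect-with-break) by a single-pass
-- finite-state-machine fold over the lines; objective: alternative decomposition, same cost.

-- ===== PORT A =====
def pvFindStart : List (Int × String) → Option Int
  | [] => none
  | (i, line) :: rest =>
      if PySem.Str.isIn "Trade History" line then some (i + 1) else pvFindStart rest

def pvCollectA (lines : List String) (start : Int) : List Int → List String → List String
  | [], acc => acc
  | i :: rest, acc =>
      if PySem.Str.strip (PySem.List.pyGetD lines i "") == "" then pvCollectA lines start rest acc
      else if decide (start < i) && !PySem.Str.isIn "," (PySem.Str.strip (PySem.List.pyGetD lines i "")) then acc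
      else pvCollectA lines start rest (acc ++ [PySem.List.pyGetD lines i ""])

def extract_data_lines_py (content : String) : List String :=
  let lines := PySem.Str.splitlines content
  match pvFindStart (PySem.List.enumerate lines 0) with
  | none => lines.filter (fun l => !(PySem.Str.strip l == ""))
  | some start => pvCollectA lines start (PySem.List.pyRange start (PySem.List.len lines) 1) []

-- ===== PORT B =====
-- one step of the state machine: state 0 = SEARCH, 1 = FIRST, 2 = COLLECT, 3 = DONE
def pvStep (st : Nat × List String × List String) (line : String) : Nat × List String × List String :=
  let state := st.1
  let fallback := if !(PySem.Str.strip line == "") then st.2.1 ++ [line] else st.2.1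
  let sect := st.2.2
  if state == 0 then
    if PySem.Str.isIn "Trade History" line then (1, fallback, sect) else (0, fallback, sect)
  else if state == 1 then
    if !(PySem.Str.strip line == "") then (2, fallback, sect ++ [line]) else (2, fallback, sect)
  else if state == 2 then
    let s := PySem.Str.strip line
    if !(s == "") then
      if PySem.Str.isIn "," s then (2, fallback, sect ++ [line]) else (3, fallback, sect)
    else (2, fallback, sect)
  else (3, fallback, sect)

def extract_data_lines_py_alt (content : String) : List String :=
  let r := (PySem.Str.splitlines content).foldl pvStep (0, [], [])
  if r.1 == 0 then r.2.1 else r.2.2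

-- ===== PRECONDITION & SPEC =====
def Spec_extract_data_lines_py (content : String) (out : List String) : Prop := out = extract_data_lines_py_alt content
instance (content : String) (out : List String) : Decidable (Spec_extract_data_lines_py content out) := by unfold Spec_extract_data_lines_py; infer_instance

-- ===== CLAIM (what is proved, stated in full; the proofs are below) =====
def Claim_equal_extract_data_lines_py : Prop := ∀ (content : String), Dom_extract_data_lines_py content → Spec_extract_data_lines_py content (extract_data_lines_py content)

-- ===== LEMMAS AND PROOFS =====

-- "take lines, skipping blanks, until a non-empty comma-free line" — common characterisation
def pvTfu : List String → List String
  | [] => []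
  | l :: r =>
      if PySem.Str.strip l == "" then pvTfu r
      else if !PySem.Str.isIn "," (PySem.Str.strip l) then []
      else l :: pvTfu r

-- the section lines starting at the header row (kept if non-blank regardless of commas)
def pvFirstTfu : List String → List String
  | [] => []
  | l :: r => (if !(PySem.Str.strip l == "") then [l] else []) ++ pvTfu r

-- the suffix of the line list after the first line containing the marker
def pvAfter : List String → Option (List String)
  | [] => none
  | l :: r => if PySem.Str.isIn "Trade History" l then some r else pvAfter r

lemma pvCollectA_range (L : List String) (start : Int) :
    ∀ (n jn : Nat) (acc : List String), L.length - jn = n → jn ≤ L.length → start < (jn : Int) →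
    pvCollectA L start (PySem.List.pyRange (jn : Int) (PySem.List.len L) 1) acc
      = acc ++ pvTfu (L.drop jn) := by
  intro n
  induction n with
  | zero =>
      intro jn acc h1 h2 _
      have hj : jn = L.length := by omega
      subst hj
      rw [PySem.List.pyRange_one_eq_nil (by simp)]
      simp [pvCollectA, pvTfu]
  | succ n ih =>
      intro jn acc h1 h2 hlt
      have hj : jn < L.length := by omega
      rw [PySem.List.pyRange_one_cons (by simp; exact_mod_cast hj)]
      have hget : PySem.List.pyGetD L (jn : Int) "" = L[jn] := by
        rw [PySem.List.pyGetD_natCast, List.getD_eq_getElem L "" hj]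
      have hdrop : L.drop jn = L[jn] :: L.drop (jn + 1) := List.drop_eq_getElem_cons hj
      have hcast : (jn : Int) + 1 = ((jn + 1 : Nat) : Int) := by push_cast; ring
      by_cases he : (PySem.Str.strip L[jn] == "") = true
      · simp only [pvCollectA, hget, if_pos he]
        rw [hcast, ih (jn + 1) acc (by omega) (by omega) (by omega), hdrop]
        simp only [pvTfu, if_pos he]
      · by_cases hc : PySem.Str.isIn "," (PySem.Str.strip L[jn]) = true
        · simp only [pvCollectA, hget]
          rw [if_neg he, if_neg (by rw [hc]; simp)]
          rw [hcast, ih (jn + 1) (acc ++ [L[jn]]) (by omega) (by omega) (by omega), hdrop]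
          have ht : pvTfu (L[jn] :: L.drop (jn + 1)) = L[jn] :: pvTfu (L.drop (jn + 1)) := by
            simp only [pvTfu]
            rw [if_neg he, if_neg (by rw [hc]; simp)]
          rw [ht]
          simp
        · simp only [Bool.not_eq_true] at hc
          simp only [pvCollectA, hget]
          rw [if_neg he, if_pos (by rw [hc]; simp [hlt])]
          rw [hdrop]
          have ht : pvTfu (L[jn] :: L.drop (jn + 1)) = [] := by
            simp only [pvTfu]
            rw [if_neg he, if_pos (by rw [hc]; simp)]
          rw [ht]
          simp

-- A's collect loop from index kn computes pvFirstTfu of the suffix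
lemma pvCollectA_firstTfu (L : List String) (kn : Nat) (hk : kn ≤ L.length) :
    pvCollectA L (kn : Int) (PySem.List.pyRange (kn : Int) (PySem.List.len L) 1) []
      = pvFirstTfu (L.drop kn) := by
  by_cases hend : kn = L.length
  · subst hend
    rw [PySem.List.pyRange_one_eq_nil (by simp)]
    simp [pvCollectA, pvFirstTfu]
  · have hj : kn < L.length := by omega
    have hget : PySem.List.pyGetD L (kn : Int) "" = L[kn] := by
      rw [PySem.List.pyGetD_natCast, List.getD_eq_getElem L "" hj]
    have hdrop : L.drop kn = L[kn] :: L.drop (kn + 1) := List.drop_eq_getElem_cons hj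
    have hcast : (kn : Int) + 1 = ((kn + 1 : Nat) : Int) := by push_cast; ring
    rw [PySem.List.pyRange_one_cons (by simp; exact_mod_cast hj), hdrop]
    by_cases he : (PySem.Str.strip L[kn] == "") = true
    · simp only [pvCollectA, hget, if_pos he]
      rw [hcast, pvCollectA_range L (kn : Int) (L.length - (kn + 1)) (kn + 1) [] rfl (by omega) (by omega)]
      simp [pvFirstTfu, he]
    · simp only [pvCollectA, hget]
      rw [if_neg he, if_neg (by simp)]
      rw [hcast, pvCollectA_range L (kn : Int) (L.length - (kn + 1)) (kn + 1) ([] ++ [L[kn]]) rfl (by omega) (by omega)]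
      simp only [Bool.not_eq_true] at he
      simp [pvFirstTfu, he]

-- link: pvFindStart over enumerate versus pvAfter
lemma pvFindStart_after (L : List String) : ∀ (s : Nat),
    (pvAfter L = none → pvFindStart (PySem.List.enumerate L (s : Int)) = none) ∧
    (∀ post, pvAfter L = some post →
      ∃ kn : Nat, pvFindStart (PySem.List.enumerate L (s : Int)) = some (kn : Int) ∧
        s < kn ∧ kn ≤ s + L.length ∧ L.drop (kn - s) = post) := by
  induction L with
  | nil => intro s; simp [pvAfter, PySem.List.enumerate_nil, pvFindStart]
  | cons x xs ih =>
      intro s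
      rw [PySem.List.enumerate_cons]
      by_cases hm : PySem.Str.isIn "Trade History" x = true
      · constructor
        · intro h
          simp only [pvAfter, if_pos hm] at h
          cases h
        · intro post h
          simp only [pvAfter, if_pos hm, Option.some.injEq] at h
          refine ⟨s + 1, ?_, by omega, by simp, ?_⟩
          · simp only [pvFindStart, if_pos hm]
            norm_cast
          · rw [show s + 1 - s = 1 by omega]
            simpa using h
      · have hstep : pvFindStart ((((s : Int), x)) :: PySem.List.enumerate xs ((s : Int) + 1))
            = pvFindStart (PySem.List.enumerate xs (((s + 1 : Nat) : Int))) := by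
          simp only [pvFindStart, if_neg hm]
          norm_cast
        rw [hstep]
        constructor
        · intro h
          simp only [pvAfter, if_neg hm] at h
          exact (ih (s + 1)).1 h
        · intro post h
          simp only [pvAfter, if_neg hm] at h
          obtain ⟨kn, h1, h2, h3, h4⟩ := (ih (s + 1)).2 post h
          refine ⟨kn, h1, by omega, by simp; omega, ?_⟩
          rw [show kn - s = (kn - (s + 1)) + 1 by omega, List.drop_succ_cons] at *
          exact h4

-- B: from DONE nothing changes except the fallback
lemma pvStep_done (L : List String) : ∀ (f sec : List String),
    L.foldl pvStep (3, f, sec) = (3, f ++ L.filter (fun l => !(PySem.Str.strip l == "")), sec) := by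
  induction L with
  | nil => intro f sec; simp
  | cons x xs ih =>
      intro f sec
      rw [List.foldl_cons]
      by_cases he : (PySem.Str.strip x == "") = true
      · have : pvStep (3, f, sec) x = (3, f, sec) := by simp [pvStep, he]
        rw [this, ih, List.filter_cons_of_neg (by simp [he])]
      · have : pvStep (3, f, sec) x = (3, f ++ [x], sec) := by simp [pvStep, he]
        rw [this, ih, List.filter_cons_of_pos (by simp [he])]
        simp

-- B: from COLLECT the section grows by pvTfu and the state never returns to SEARCH
lemma pvStep_collect (L : List String) : ∀ (f sec : List String),
    (L.foldl pvStep (2, f, sec)).1 ≠ 0 ∧ (L.foldl pvStep (2, f, sec)).2.2 = sec ++ pvTfu L := by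
  induction L with
  | nil => intro f sec; simp [pvTfu]
  | cons x xs ih =>
      intro f sec
      rw [List.foldl_cons]
      by_cases he : (PySem.Str.strip x == "") = true
      · have : pvStep (2, f, sec) x = (2, f, sec) := by simp [pvStep, he]
        rw [this]
        obtain ⟨h1, h2⟩ := ih f sec
        exact ⟨h1, by rw [h2]; simp [pvTfu, he]⟩
      · by_cases hc : PySem.Str.isIn "," (PySem.Str.strip x) = true
        · have hc' : PySem.Chars.isIn [','] (PySem.Chars.strip x.toList) = true := by
            simpa using hc
          have hstep : pvStep (2, f, sec) x
              = (2, (if !(PySem.Str.strip x == "") then f ++ [x] else f), sec ++ [x]) := by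
            simp [pvStep, he, hc']
          rw [hstep]
          obtain ⟨h1, h2⟩ := ih _ (sec ++ [x])
          refine ⟨h1, ?_⟩
          rw [h2]
          have ht : pvTfu (x :: xs) = x :: pvTfu xs := by
            simp only [pvTfu]
            rw [if_neg he, if_neg (by rw [hc]; simp)]
          rw [ht]
          simp
        · have hc' : PySem.Chars.isIn [','] (PySem.Chars.strip x.toList) = false := by
            simpa using (Bool.not_eq_true _ |>.mp hc)
          have hstep : pvStep (2, f, sec) x
              = (3, (if !(PySem.Str.strip x == "") then f ++ [x] else f), sec) := by
            simp [pvStep, he, hc']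
          rw [hstep, pvStep_done]
          refine ⟨by simp, ?_⟩
          have ht : pvTfu (x :: xs) = [] := by
            simp only [pvTfu]
            rw [if_neg he, if_pos (by rw [Bool.not_eq_true _ |>.mp hc]; simp)]
          rw [ht]
          simp

-- B: from FIRST the section becomes pvFirstTfu
lemma pvStep_first (L : List String) (f : List String) :
    (L.foldl pvStep (1, f, [])).1 ≠ 0 ∧ (L.foldl pvStep (1, f, [])).2.2 = pvFirstTfu L := by
  cases L with
  | nil => simp [pvFirstTfu]
  | cons x xs =>
      rw [List.foldl_cons]
      by_cases he : (PySem.Str.strip x == "") = true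
      · have : pvStep (1, f, []) x = (2, f, []) := by simp [pvStep, he]
        rw [this]
        obtain ⟨h1, h2⟩ := pvStep_collect xs f []
        exact ⟨h1, by rw [h2]; simp [pvFirstTfu, he]⟩
      · have : pvStep (1, f, []) x = (2, f ++ [x], [] ++ [x]) := by simp [pvStep, he]
        rw [this]
        obtain ⟨h1, h2⟩ := pvStep_collect xs (f ++ [x]) ([] ++ [x])
        exact ⟨h1, by rw [h2]; simp [pvFirstTfu, he]⟩

-- B: from SEARCH, by cases on whether the marker occurs
lemma pvStep_search (L : List String) : ∀ (f : List String),
    (pvAfter L = none →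
      L.foldl pvStep (0, f, []) = (0, f ++ L.filter (fun l => !(PySem.Str.strip l == "")), [])) ∧
    (∀ post, pvAfter L = some post →
      (L.foldl pvStep (0, f, [])).1 ≠ 0 ∧ (L.foldl pvStep (0, f, [])).2.2 = pvFirstTfu post) := by
  induction L with
  | nil => intro f; simp [pvAfter]
  | cons x xs ih =>
      intro f
      rw [List.foldl_cons]
      by_cases hm : PySem.Str.isIn "Trade History" x = true
      · have hm' : PySem.Chars.isIn ['T','r','a','d','e',' ','H','i','s','t','o','r','y'] x.toList = true := by
          simpa using hm
        have hx : pvStep (0, f, []) x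
            = (1, (if !(PySem.Str.strip x == "") then f ++ [x] else f), []) := by
          simp [pvStep, hm']
        constructor
        · intro h
          simp only [pvAfter, if_pos hm] at h
          cases h
        · intro post h
          simp only [pvAfter, if_pos hm, Option.some.injEq] at h
          subst h
          rw [hx]
          exact pvStep_first xs _
      · have hm' : PySem.Chars.isIn ['T','r','a','d','e',' ','H','i','s','t','o','r','y'] x.toList = false := by
          simpa using (Bool.not_eq_true _ |>.mp hm)
        have hx : pvStep (0, f, []) x
            = (0, (if !(PySem.Str.strip x == "") then f ++ [x] else f), []) := by
          simp [pvStep, hm']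
        rw [hx]
        constructor
        · intro h
          simp only [pvAfter, if_neg hm] at h
          rw [(ih _).1 h]
          by_cases he : (PySem.Str.strip x == "") = true
          · rw [List.filter_cons_of_neg (by simp [he])]; simp [he]
          · rw [List.filter_cons_of_pos (by simp [he])]; simp [he]
        · intro post h
          simp only [pvAfter, if_neg hm] at h
          exact (ih _).2 post h

-- ===== VERDICT (by name: the statement is the Claim_ definition above) =====
theorem extract_data_lines_py_spec : Claim_equal_extract_data_lines_py := by
  intro content _
  unfold Spec_extract_data_lines_py extract_data_lines_py extract_data_lines_py_alt
  dsimp only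
  set L := PySem.Str.splitlines content with hL
  cases hA : pvAfter L with
  | none =>
      have hfs : pvFindStart (PySem.List.enumerate L 0) = none := by
        have := (pvFindStart_after L 0).1 hA
        simpa using this
      rw [hfs, (pvStep_search L []).1 hA]
      simp
  | some post =>
      obtain ⟨kn, h1, h2, h3, h4⟩ := (pvFindStart_after L 0).2 post hA
      have hfs : pvFindStart (PySem.List.enumerate L 0) = some (kn : Int) := by
        simpa using h1
      rw [hfs]
      obtain ⟨hb1, hb2⟩ := (pvStep_search L []).2 post hA
      have hbr : (if (L.foldl pvStep (0, [], [])).1 == 0 then (L.foldl pvStep (0, [], [])).2.1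
          else (L.foldl pvStep (0, [], [])).2.2) = pvFirstTfu post := by
        rw [if_neg (by simpa using hb1), hb2]
      rw [hbr]
      have hdrop : L.drop kn = post := by simpa using h4
      rw [← hdrop]
      exact pvCollectA_firstTfu L kn (by omega)
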